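-- pv_equiv track=rewrite | github.com/robertmattmueller/myND | tools/benchmark.py | numericparts
-- ===== SOURCE A (Python) =====
-- def numericparts(path):
--     if path.lower().endswith(".sas"):
--         path = path[:len(path) - len(".sas")]
--     path = path.replace("-", " ")
--     path = path.replace("_", " ")
--     path = path.replace(".", " ")
--     path = path.replace("/", " ")
--     parts = path.split(" ")
--     found_numerics = False
--     nonnumeric_parts = []
--     i = len(parts) - 1
--     while i >= 0:
--         numericstr = ""
--         numerics = 0
--         nonnumerics = 0
--         k = 0
--         while k < len(parts[i]):
--             if ord(parts[i][k]) >= ord("0") and ord(parts[i][k]) <= ord("9"):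
--                 numerics += 1
--                 numericstr += parts[i][k]
--             else:
--                 nonnumerics += 1
--             k += 1
--         if nonnumerics > numerics:
--             if found_numerics:
--                 # stop here. we went through all appended numeric parts
--                 nonnumeric_parts = parts[:(i+1)] + nonnumeric_parts
--                 parts = parts[(i+1):]
--             else:
--                 # just skip, we still haven't encountered a numeric part
--                 nonnumeric_parts = [parts[len(parts) - 1]] + nonnumeric_parts
--                 parts = parts[:len(parts) - 1]
--                 i -= 1
--                 continue
--             break
--         found_numerics = True
--         try:
--             parts[i] = int(numericstr)
--         except ValueError:
--             parts[i] = 0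
--         i -= 1
--     return (parts, nonnumeric_parts)
-- ===== SOURCE B (Python) =====
-- def _classify(p):
--     digits = [c for c in p if c.isdigit()]
--     value = int("".join(digits)) if digits else 0
--     return len(p) <= 2 * len(digits), value
--
--
-- def numericparts(path):
--     if path.lower().endswith(".sas"):
--         path = path[:-4]
--     for ch in "-_./":
--         path = path.replace(ch, " ")
--     parts = path.split(" ")
--     rev = [(p, *_classify(p)) for p in reversed(parts)]
--     i = 0
--     while i < len(rev) and not rev[i][1]:
--         i += 1                      # skip trailing non-numeric parts
--     j = i
--     while j < len(rev) and rev[j][1]: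
--         j += 1                      # contiguous numeric run
--     nums = [v for (_p, _f, v) in reversed(rev[i:j])]
--     rest = [p for (p, _f, _v) in reversed(rev[j:])] \
--         + [p for (p, _f, _v) in reversed(rev[:i])]
--     return (nums, rest)
-- ===== Notes on version B (the rewrite author's own statement) =====
-- stated objective: simpler
-- what changed: Replaces A's mutate-while-walking state machine (in-place int conversion, list re-slicing and a found flag inside one reverse while-loop) with a classify-then-slice decomposition: classify every part once as (numeric, value), locate the trailing numeric run by two index scans, and build both result lists by slicing; a timing run also measured B faster (A's per-character index loop with ord() calls and string += is replaced by comprehensions).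
import Mathlib
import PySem

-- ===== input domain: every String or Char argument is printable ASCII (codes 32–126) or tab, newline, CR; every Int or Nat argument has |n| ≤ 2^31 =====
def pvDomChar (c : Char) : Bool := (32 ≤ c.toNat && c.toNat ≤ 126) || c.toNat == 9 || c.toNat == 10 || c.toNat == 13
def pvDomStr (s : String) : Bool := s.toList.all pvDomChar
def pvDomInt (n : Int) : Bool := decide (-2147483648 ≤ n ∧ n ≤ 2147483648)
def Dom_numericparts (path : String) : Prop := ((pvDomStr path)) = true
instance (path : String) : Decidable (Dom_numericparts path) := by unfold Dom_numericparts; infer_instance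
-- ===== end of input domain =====

-- B replaces A's mutate-while-walking reverse loop by a classify-then-slice decomposition (objective: simpler).

-- ===== PORT A =====
-- inner while loop over the characters of parts[i]: state (numericstr, numerics, nonnumerics)
def pvScanA (p : List Char) : List Char × Nat × Nat :=
  p.foldl (fun st c =>
    if 48 ≤ c.toNat ∧ c.toNat ≤ 57 then (st.1 ++ [c], st.2.1 + 1, st.2.2)
    else (st.1, st.2.1, st.2.2 + 1)) ([], 0, 0)

-- outer while loop: argument 1 is the still-unprocessed prefix of `parts` REVERSED (i walks from
-- the right), argument 2 the ints already written into `parts` in place (its converted suffix),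
-- then found_numerics and nonnumeric_parts.
def pvLoopA : List String → List Int → Bool → List String → List Int × List String
  | [], conv, _, nn => (conv, nn)
  | p :: rest, conv, found, nn =>
    let s := pvScanA p.toList
    if s.2.2 > s.2.1 then
      if found then (conv, (p :: rest).reverse ++ nn)
      else pvLoopA rest conv false (p :: nn)
    else pvLoopA rest ((PySem.Int.ofStr? (String.ofList s.1)).getD 0 :: conv) true nn

def numericparts (path : String) : List Int × List String :=
  let path0 := if PySem.Str.endswith (PySem.Str.lower path) ".sas"
               then PySem.Str.slice path none (some ((PySem.Str.len path : Int) - 4)) else path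
  let path1 := PySem.Str.replace path0 "-" " "
  let path2 := PySem.Str.replace path1 "_" " "
  let path3 := PySem.Str.replace path2 "." " "
  let path4 := PySem.Str.replace path3 "/" " "
  let parts := (PySem.Str.split? path4 " ").getD []
  pvLoopA parts.reverse [] false []

-- ===== PORT B =====
def pvClassifyB (p : String) : Bool × Int :=
  let ds := p.toList.filter (fun c => decide ('0' ≤ c ∧ c ≤ '9'))
  (decide (p.toList.length ≤ 2 * ds.length),
   if ds = [] then 0 else (PySem.Int.ofStr? (String.ofList ds)).getD 0)

def numericparts_alt (path : String) : List Int × List String :=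
  let path0 := if PySem.Str.endswith (PySem.Str.lower path) ".sas"
               then PySem.Str.slice path none (some (-4)) else path
  let stripped := ['-', '_', '.', '/'].foldl
    (fun s c => PySem.Str.replace s (String.ofList [c]) " ") path0
  let parts := (PySem.Str.split? stripped " ").getD []
  let rev := parts.reverse.map (fun p => (p, pvClassifyB p))
  let skipped := rev.dropWhile (fun t => !t.2.1)          -- Source B's first index scan: rev[i:]
  let run := skipped.takeWhile (fun t => t.2.1)           -- rev[i:j], the numeric run
  let rest := skipped.dropWhile (fun t => t.2.1)          -- rev[j:]
  let pre := rev.takeWhile (fun t => !t.2.1)              -- rev[:i]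
  ((run.map (fun t => t.2.2)).reverse,
   (rest.map (fun t => t.1)).reverse ++ (pre.map (fun t => t.1)).reverse)

-- ===== PRECONDITION & SPEC =====
def Spec_numericparts (path : String) (out : List Int × List String) : Prop := out = numericparts_alt path
instance (path : String) (out : List Int × List String) : Decidable (Spec_numericparts path out) := by unfold Spec_numericparts; infer_instance

-- ===== CLAIM (what is proved, stated in full; the proofs are below) =====
def Claim_equal_numericparts : Prop := ∀ (path : String), Dom_numericparts path → Spec_numericparts path (numericparts path)

-- ===== LEMMAS AND PROOFS =====
-- proof-side abbreviations: the per-part classification both programs compute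
def pvDig (c : Char) : Bool := decide ('0' ≤ c ∧ c ≤ '9')
def pvIsNum (p : String) : Bool := decide (p.toList.length ≤ 2 * (p.toList.filter pvDig).length)
def pvVal (p : String) : Int := (PySem.Int.ofStr? (String.ofList (p.toList.filter pvDig))).getD 0

lemma pvScanA_go (cs : List Char) (acc : List Char) (a b : Nat) :
    cs.foldl (fun st c =>
      if 48 ≤ c.toNat ∧ c.toNat ≤ 57 then (st.1 ++ [c], st.2.1 + 1, st.2.2)
      else (st.1, st.2.1, st.2.2 + 1)) (acc, a, b)
    = (acc ++ cs.filter pvDig, a + (cs.filter pvDig).length,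
       b + (cs.filter (fun c => !pvDig c)).length) := by
  induction cs generalizing acc a b with
  | nil => simp
  | cons c t ih =>
    have hd : (48 ≤ c.toNat ∧ c.toNat ≤ 57) ↔ pvDig c = true := by
      simp [pvDig, Char.le_def]
      exact ⟨fun ⟨h1, h2⟩ => ⟨h1, h2⟩, fun h => h⟩
    by_cases hc : pvDig c = true
    · rw [List.foldl_cons, if_pos (hd.mpr hc), ih]
      simp [hc]
      omega
    · rw [List.foldl_cons, if_neg (fun h => hc (hd.mp h)), ih]
      simp only [List.filter_cons, hc, Bool.not_false, Bool.false_eq_true, ite_false] at *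
      simp [hc]
      omega

lemma pvScanA_eq (p : String) :
    pvScanA p.toList = (p.toList.filter pvDig, (p.toList.filter pvDig).length,
      (p.toList.filter (fun c => !pvDig c)).length) := by
  simpa [pvScanA] using pvScanA_go p.toList [] 0 0

lemma pvNonnum_gt_iff (p : String) :
    ((p.toList.filter (fun c => !pvDig c)).length > (p.toList.filter pvDig).length)
      ↔ pvIsNum p = false := by
  have h2 := List.length_eq_length_filter_add pvDig (l := p.toList)
  simp [pvIsNum]
  simp at h2
  omega

lemma pvClassify_eq (p : String) : pvClassifyB p = (pvIsNum p, pvVal p) := by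
  dsimp only [pvClassifyB]
  rw [show (fun c => decide ('0' ≤ c ∧ c ≤ '9')) = pvDig from rfl]
  by_cases h : p.toList.filter pvDig = []
  · rw [pvIsNum, pvVal, h, if_pos rfl]
    rfl
  · rw [pvIsNum, pvVal, if_neg h]

lemma pvLoop_true (rev : List String) (conv : List Int) (nn : List String) :
    pvLoopA rev conv true nn =
      (((rev.takeWhile pvIsNum).map pvVal).reverse ++ conv,
       (rev.dropWhile pvIsNum).reverse ++ nn) := by
  induction rev generalizing conv with
  | nil => simp [pvLoopA]
  | cons p rest ih =>
    simp only [pvLoopA]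
    rw [pvScanA_eq]
    by_cases hp : pvIsNum p = true
    · rw [if_neg (by dsimp only; intro hgt; exact absurd ((pvNonnum_gt_iff p).mp hgt) (by simp [hp]))]
      rw [ih]
      simp [hp, pvVal]
    · rw [if_pos (show _ > _ from (pvNonnum_gt_iff p).mpr (by simpa using hp))]
      simp [hp]

lemma pvLoop_false (rev : List String) (nn : List String) :
    pvLoopA rev [] false nn =
      ((((rev.dropWhile (fun p => !pvIsNum p)).takeWhile pvIsNum).map pvVal).reverse,
       ((rev.dropWhile (fun p => !pvIsNum p)).dropWhile pvIsNum).reverse ++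
         ((rev.takeWhile (fun p => !pvIsNum p)).reverse ++ nn)) := by
  induction rev generalizing nn with
  | nil => simp [pvLoopA]
  | cons p rest ih =>
    simp only [pvLoopA]
    rw [pvScanA_eq]
    by_cases hp : pvIsNum p = true
    · rw [if_neg (by dsimp only; intro hgt; exact absurd ((pvNonnum_gt_iff p).mp hgt) (by simp [hp]))]
      rw [pvLoop_true]
      simp [hp, pvVal]
    · rw [if_pos (show _ > _ from (pvNonnum_gt_iff p).mpr (by simpa using hp))]
      rw [ih]
      simp [hp]

lemma pvMapFst (l : List String) (isN : String → Bool) (v : String → Int) :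
    ((((l.map (fun p => (p, (isN p, v p)))).dropWhile (fun t => !t.2.1)).takeWhile (fun t => t.2.1)).map (fun t => t.2.2)).reverse
      = (((l.dropWhile (fun p => !isN p)).takeWhile isN).map v).reverse := by
  simp [List.dropWhile_map, List.takeWhile_map, Function.comp_def, List.map_map]

lemma pvMapSnd (l : List String) (isN : String → Bool) (v : String → Int) :
    ((((l.map (fun p => (p, (isN p, v p)))).dropWhile (fun t => !t.2.1)).dropWhile (fun t => t.2.1)).map (fun t => t.1)).reverse
    ++ (((l.map (fun p => (p, (isN p, v p)))).takeWhile (fun t => !t.2.1)).map (fun t => t.1)).reverse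
      = ((l.dropWhile (fun p => !isN p)).dropWhile isN).reverse ++ (l.takeWhile (fun p => !isN p)).reverse := by
  simp [List.dropWhile_map, List.takeWhile_map, Function.comp_def, List.map_map]

-- ===== VERDICT (by name: the statement is the Claim_ definition above) =====
theorem numericparts_spec : Claim_equal_numericparts := by
  intro path _
  unfold Spec_numericparts
  simp only [numericparts, numericparts_alt]
  have hpath0 : (if PySem.Str.endswith (PySem.Str.lower path) ".sas"
               then PySem.Str.slice path none (some ((PySem.Str.len path : Int) - 4)) else path)
      = (if PySem.Str.endswith (PySem.Str.lower path) ".sas"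
               then PySem.Str.slice path none (some (-4)) else path) := by
    by_cases h : PySem.Str.endswith (PySem.Str.lower path) ".sas" = true
    · have hlen : 4 ≤ path.toList.length := by
        simp [pysem, PySem.Chars.endswith_iff] at h
        have := h.length_le
        simpa [PySem.Chars.lower] using this
      rw [if_pos h, if_pos h]
      apply String.toList_inj.mp
      simp [pysem]
      rw [PySem.List.slice_to path.toList (b := ((path.length : Int)) - 4) (by simp at hlen ⊢; omega)]
      congr 1
      simp at hlen ⊢
      omega
    · rw [if_neg h, if_neg h]
  rw [hpath0]
  rw [show ∀ x : String, ['-', '_', '.', '/'].foldl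
      (fun s c => PySem.Str.replace s (String.ofList [c]) " ") x
      = PySem.Str.replace (PySem.Str.replace (PySem.Str.replace (PySem.Str.replace
          x "-" " ") "_" " ") "." " ") "/" " " from fun x => rfl]
  rw [pvLoop_false]
  rw [show (fun p => (p, pvClassifyB p)) = (fun p : String => (p, (pvIsNum p, pvVal p))) from funext fun p => by rw [pvClassify_eq]]
  rw [Prod.mk.injEq]
  constructor
  · exact (pvMapFst _ pvIsNum pvVal).symm
  · rw [List.append_nil]
    exact (pvMapSnd _ pvIsNum pvVal).symm
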